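-- pv_equiv track=rewrite | github.com/tangbotony/GraTAG | alg/src/include/utils/timeline_utils.py | find_sentence_boundaries
-- ===== SOURCE A (Python) =====
-- def find_sentence_boundaries(text, truncated_text):
--     # 找到被截断文本在原文本中的位置
--     start_idx = text.find(truncated_text)
--     if start_idx == -1:
--         return None, None
--     end_idx = start_idx + len(truncated_text)
--     symbol_list = ["!", "?", "。", "！", "？", "/n", ";", "；", " "]
--     # 找到前面最近的断句位置
--     before_boundary = max([text.rfind(p, 0, start_idx) for p in symbol_list])
--     # 找到后面最近的断句位置
--     after_boundary = min([text.find(p, end_idx) for p in symbol_list if text.find(p, end_idx) != -1] or [len(text)])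
--     if before_boundary == -1:
--         before_boundary = 0
--     else:
--         before_boundary += 1  # 包含断句符号本身
--     if after_boundary == -1:
--         after_boundary = len(text)
--     else:
--         after_boundary += 1  # 包含断句符号本身
--     return before_boundary, after_boundary
-- ===== SOURCE B (Python) =====
-- def find_sentence_boundaries(text, truncated_text):
--     # Single directional character scans instead of per-symbol rfind/find passes.
--     start_idx = text.find(truncated_text)
--     if start_idx == -1:
--         return None, None
--     end_idx = start_idx + len(truncated_text)
--     singles = set("!?。！？;； ")
--     before = -1
--     i = start_idx - 1
--     while i >= 0:
--         if text[i] in singles or (text[i] == '/' and i + 2 <= start_idx and text[i + 1] == 'n'):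
--             before = i
--             break
--         i -= 1
--     after = None
--     j = end_idx
--     while j < len(text):
--         if text[j] in singles or (text[j] == '/' and j + 1 < len(text) and text[j + 1] == 'n'):
--             after = j
--             break
--         j += 1
--     if after is None:
--         after = len(text)
--     return (0 if before == -1 else before + 1), after + 1
-- ===== Notes on version B (the rewrite author's own statement) =====
-- stated objective: alternative
-- what changed: Replaces the nine per-symbol text.rfind/text.find passes (plus max/min over their results) with two single directional character scans over a delimiter set: one walking left from start_idx for the nearest boundary before, one walking right from end_idx for the nearest boundary after.
import Mathlib
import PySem

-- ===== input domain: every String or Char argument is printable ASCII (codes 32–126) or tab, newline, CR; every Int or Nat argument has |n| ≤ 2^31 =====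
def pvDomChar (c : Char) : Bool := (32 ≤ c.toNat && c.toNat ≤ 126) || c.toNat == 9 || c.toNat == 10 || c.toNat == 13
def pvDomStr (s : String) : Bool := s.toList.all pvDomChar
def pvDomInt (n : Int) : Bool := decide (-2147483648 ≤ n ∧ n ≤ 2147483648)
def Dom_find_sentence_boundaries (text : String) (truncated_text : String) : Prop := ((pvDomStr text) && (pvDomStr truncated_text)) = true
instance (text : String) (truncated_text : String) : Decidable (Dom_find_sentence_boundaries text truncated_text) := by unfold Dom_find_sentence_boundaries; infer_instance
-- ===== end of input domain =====

-- B replaces A's nine per-symbol rfind/find passes by two directional character scans; return values agree everywhere (objective: alternative).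

-- ===== PORT A =====
-- A's symbol list, as strings (the two-character "/n" entry included verbatim).
def fsbSymbols : List String := ["!", "?", "。", "！", "？", "/n", ";", "；", " "]

def find_sentence_boundaries (text : String) (truncated_text : String) : Option Int × Option Int :=
  let start_idx := PySem.Str.find text truncated_text
  if start_idx = -1 then (none, none)
  else
    let end_idx : Int := start_idx + (PySem.Str.len truncated_text : Int)
    -- max([text.rfind(p, 0, start_idx) for p in symbol_list])  (the list literal is nonempty, so Python's max is the running-max loop)
    let rlist := fsbSymbols.map (fun p => PySem.Str.rfindFrom text p 0 (some start_idx))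
    let before_boundary : Int := match rlist with
      | [] => -1   -- unreachable: fsbSymbols is a nonempty literal
      | x :: r => r.foldl max x
    -- min([text.find(p, end_idx) for p in symbol_list if text.find(p, end_idx) != -1] or [len(text)])
    let cands := fsbSymbols.filterMap (fun p =>
      if PySem.Str.findFrom text p end_idx none ≠ -1 then some (PySem.Str.findFrom text p end_idx none) else none)
    let after_boundary : Int := match cands with
      | [] => (PySem.Str.len text : Int)
      | x :: r => r.foldl min x
    let before' : Int := if before_boundary = -1 then 0 else before_boundary + 1
    let after' : Int := if after_boundary = -1 then (PySem.Str.len text : Int) else after_boundary + 1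
    (some before', some after')

-- ===== PORT B =====
-- The single-character delimiters (B's `singles` set).
def fsbSingles : List Char := ['!', '?', '。', '！', '？', ';', '；', ' ']

-- B's loop test at index i of the backward scan (bounded by start_idx).
def fsbDelimB (s : List Char) (start i : Nat) : Bool :=
  (match s[i]? with | some c => fsbSingles.contains c | none => false)
  || (s[i]? = some '/' && i + 2 ≤ start && s[i+1]? = some 'n')

-- B's loop test at index j of the forward scan.
def fsbDelimA (s : List Char) (j : Nat) : Bool :=
  (match s[j]? with | some c => fsbSingles.contains c | none => false)
  || (s[j]? = some '/' && s[j+1]? = some 'n')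

-- backward scan: indices i, i-1, …, 0; first hit wins, else -1
def fsbBefore (s : List Char) (start : Nat) : Nat → Int
  | 0 => if fsbDelimB s start 0 then 0 else -1
  | i + 1 => if fsbDelimB s start (i+1) then (i+1 : Nat) else fsbBefore s start i

-- forward scan: indices j, j+1, … while j < len; first hit wins, else len
def fsbAfter (s : List Char) (j : Nat) : Int :=
  if h : j < s.length then
    if fsbDelimA s j then (j : Int) else fsbAfter s (j+1)
  else (s.length : Int)
termination_by s.length - j

def find_sentence_boundaries_alt (text : String) (truncated_text : String) : Option Int × Option Int :=
  let s := text.toList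
  let t := truncated_text.toList
  let start_idx := PySem.Chars.find s t
  if start_idx = -1 then (none, none)
  else
    let st := start_idx.toNat
    let before : Int := if st = 0 then -1 else fsbBefore s st (st - 1)
    let after : Int := fsbAfter s (st + t.length)
    (some (if before = -1 then 0 else before + 1), some (after + 1))

-- ===== PRECONDITION & SPEC =====
def Spec_find_sentence_boundaries (text : String) (truncated_text : String) (out : Option Int × Option Int) : Prop := out = find_sentence_boundaries_alt text truncated_text
instance (text : String) (truncated_text : String) (out : Option Int × Option Int) : Decidable (Spec_find_sentence_boundaries text truncated_text out) := by unfold Spec_find_sentence_boundaries; infer_instance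

-- ===== CLAIM (what is proved, stated in full; the proofs are below) =====
def Claim_equal_find_sentence_boundaries : Prop := ∀ (text : String) (truncated_text : String), Dom_find_sentence_boundaries text truncated_text → Spec_find_sentence_boundaries text truncated_text (find_sentence_boundaries text truncated_text)

-- ===== LEMMAS AND PROOFS =====

-- "r is the largest index k ≤ j with H k, or -1 when there is none"
def IsLastHit (H : Nat → Prop) (j : Nat) (r : Int) : Prop :=
  (r = -1 ∧ ∀ k, k ≤ j → ¬ H k) ∨
  (∃ m : Nat, r = (m : Int) ∧ m ≤ j ∧ H m ∧ ∀ k, m < k → k ≤ j → ¬ H k)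

-- "r is the least index k ≥ j with H k (and only then k < n), or n when there is none"
def IsFirstHit (H : Nat → Prop) (j n : Nat) (r : Int) : Prop :=
  (r = (n : Int) ∧ ∀ k, j ≤ k → ¬ H k) ∨
  (∃ m : Nat, r = (m : Int) ∧ j ≤ m ∧ m < n ∧ H m ∧ ∀ k, j ≤ k → k < m → ¬ H k)

theorem isLastHit_unique (H : Nat → Prop) (j : Nat) (r₁ r₂ : Int)
    (h₁ : IsLastHit H j r₁) (h₂ : IsLastHit H j r₂) : r₁ = r₂ := by
  rcases h₁ with ⟨e₁, n₁⟩ | ⟨m₁, e₁, hm₁, hH₁, hmax₁⟩ <;>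
    rcases h₂ with ⟨e₂, n₂⟩ | ⟨m₂, e₂, hm₂, hH₂, hmax₂⟩
  · omega
  · exact absurd hH₂ (n₁ m₂ hm₂)
  · exact absurd hH₁ (n₂ m₁ hm₁)
  · subst e₁ e₂
    rcases Nat.lt_trichotomy m₁ m₂ with h | h | h
    · exact absurd hH₂ (hmax₁ m₂ h hm₂)
    · omega
    · exact absurd hH₁ (hmax₂ m₁ h hm₁)

theorem isFirstHit_unique (H : Nat → Prop) (j n : Nat) (r₁ r₂ : Int)
    (h₁ : IsFirstHit H j n r₁) (h₂ : IsFirstHit H j n r₂) : r₁ = r₂ := by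
  rcases h₁ with ⟨e₁, n₁⟩ | ⟨m₁, e₁, hj₁, hn₁, hH₁, hmin₁⟩ <;>
    rcases h₂ with ⟨e₂, n₂⟩ | ⟨m₂, e₂, hj₂, hn₂, hH₂, hmin₂⟩
  · omega
  · exact absurd hH₂ (n₁ m₂ hj₂)
  · exact absurd hH₁ (n₂ m₁ hj₁)
  · subst e₁ e₂
    rcases Nat.lt_trichotomy m₁ m₂ with h | h | h
    · exact absurd hH₁ (hmin₂ m₁ hj₁ h)
    · omega
    · exact absurd hH₂ (hmin₁ m₂ hj₂ h)

-- congruence on the hit predicate, restricted below the bound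
theorem isLastHit_congr (H H' : Nat → Prop) (j : Nat) (r : Int)
    (hiff : ∀ k, k ≤ j → (H k ↔ H' k)) (h : IsLastHit H j r) : IsLastHit H' j r := by
  rcases h with ⟨e, hn⟩ | ⟨m, e, hm, hH, hmax⟩
  · exact Or.inl ⟨e, fun k hk hk' => hn k hk ((hiff k hk).mpr hk')⟩
  · exact Or.inr ⟨m, e, hm, (hiff m hm).mp hH,
      fun k h1 h2 hk' => hmax k h1 h2 ((hiff k h2).mpr hk')⟩

theorem isFirstHit_congr (H H' : Nat → Prop) (j n : Nat) (r : Int)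
    (hiff : ∀ k, j ≤ k → (H k ↔ H' k)) (h : IsFirstHit H j n r) : IsFirstHit H' j n r := by
  rcases h with ⟨e, hn⟩ | ⟨m, e, hj, hlt, hH, hmin⟩
  · exact Or.inl ⟨e, fun k hk hk' => hn k hk ((hiff k hk).mpr hk')⟩
  · exact Or.inr ⟨m, e, hj, hlt, (hiff m hj).mp hH,
      fun k h1 h2 hk' => hmin k h1 h2 ((hiff k h1).mpr hk')⟩

theorem isLastHit_of_not_top (H : Nat → Prop) (j : Nat) (r : Int)
    (hnot : ¬ H (j + 1)) (h : IsLastHit H (j + 1) r) : IsLastHit H j r := by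
  rcases h with ⟨e, hn⟩ | ⟨m, e, hm, hH, hmax⟩
  · exact Or.inl ⟨e, fun k hk => hn k (by omega)⟩
  · by_cases hm' : m ≤ j
    · exact Or.inr ⟨m, e, hm', hH, fun k h1 h2 => hmax k h1 (by omega)⟩
    · have he : m = j + 1 := by omega
      exact absurd (he ▸ hH) hnot

-- one- and two-character prefix characterisations
theorem single_prefix (c : Char) (l : List Char) : [c] <+: l ↔ l[0]? = some c := by
  cases l with
  | nil => simp
  | cons x xs => simp [List.cons_prefix_cons, eq_comm]

theorem pair_prefix (a b : Char) (l : List Char) :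
    [a, b] <+: l ↔ (l[0]? = some a ∧ l[1]? = some b) := by
  cases l with
  | nil => simp
  | cons x xs =>
    cases xs with
    | nil => simp [List.cons_prefix_cons]
    | cons y ys => simp [List.cons_prefix_cons, eq_comm]

-- the characterisation of PySem.Chars.rfind.go (the backward search loop behind rfind)
theorem rfind_go_isLastHit (u p : List Char) :
    ∀ j, IsLastHit (fun k => p <+: u.drop k) j (PySem.Chars.rfind.go u p j) := by
  intro j
  induction j with
  | zero =>
    by_cases h : p.isPrefixOf u
    · exact Or.inr ⟨0, by simp [PySem.Chars.rfind.go, h], by omega,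
        by simpa using (List.isPrefixOf_iff_prefix.mp h), by omega⟩
    · exact Or.inl ⟨by simp [PySem.Chars.rfind.go, h], by
        intro k hk; interval_cases k
        simpa using fun hc => h (List.isPrefixOf_iff_prefix.mpr (by simpa using hc))⟩
  | succ j ih =>
    by_cases h : p.isPrefixOf (u.drop (j+1))
    · exact Or.inr ⟨j+1, by simp [PySem.Chars.rfind.go, h], le_refl _,
        List.isPrefixOf_iff_prefix.mp h, by omega⟩
    · have hgo : PySem.Chars.rfind.go u p (j+1) = PySem.Chars.rfind.go u p j := by
        simp [PySem.Chars.rfind.go, h]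
      rw [hgo]
      have hnot : ¬ p <+: u.drop (j+1) := fun hc => h (List.isPrefixOf_iff_prefix.mpr hc)
      rcases ih with ⟨e, hn⟩ | ⟨m, e, hm, hH, hmax⟩
      · exact Or.inl ⟨e, fun k hk hc => by
          rcases Nat.lt_or_ge k (j+1) with h' | h'
          · exact hn k (by omega) hc
          · have : k = j + 1 := by omega
            exact hnot (this ▸ hc)⟩
      · exact Or.inr ⟨m, e, by omega, hH, fun k h1 h2 hc => by
          rcases Nat.lt_or_ge k (j+1) with h' | h'
          · exact hmax k h1 (by omega) hc
          · have : k = j + 1 := by omega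
            exact hnot (this ▸ hc)⟩

-- rfind(p, 0, st) = rfind of the prefix of length st
theorem rfindFrom_eq_rfind_take (s p : List Char) (st : Nat) (h : st ≤ s.length) :
    PySem.Chars.rfindFrom s p 0 (some (st:Int)) = PySem.Chars.rfind (s.take st) p := by
  simp only [PySem.Chars.rfindFrom]
  have h1 : ¬ ((s.length : Int) < (st:Int)) := by exact_mod_cast not_lt.mpr h
  have h2 : ¬ ((st:Int) < 0) := by simp
  simp only [if_neg h1, if_neg h2, Int.toNat_natCast]
  split_ifs with hlt hr hr' <;> simp_all

theorem rfind_isLastHit (u p : List Char) :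
    IsLastHit (fun k => p <+: u.drop k) u.length (PySem.Chars.rfind u p) :=
  rfind_go_isLastHit u p u.length

-- Python max over the mapped list of rfind results
theorem foldl_max_isLastHit {α : Type} (j : Nat) (f : α → Int) (H : α → Nat → Prop)
    (a : α) (ps : List α)
    (hf : ∀ p ∈ a :: ps, IsLastHit (H p) j (f p)) :
    IsLastHit (fun k => ∃ p ∈ a :: ps, H p k) j ((ps.map f).foldl max (f a)) := by
  set M := (ps.map f).foldl max (f a) with hM
  have hub : ∀ p ∈ a :: ps, f p ≤ M := by
    intro p hp
    rcases List.mem_cons.mp hp with rfl | hp'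
    · exact (PySem.List.le_foldl_max (ps.map f) (f p)).1
    · exact (PySem.List.le_foldl_max (ps.map f) (f a)).2 _ (List.mem_map_of_mem hp')
  have hmem : ∃ p ∈ a :: ps, M = f p := by
    rcases PySem.List.foldl_max_mem (ps.map f) (f a) with h | h
    · exact ⟨a, List.mem_cons_self, h⟩
    · rcases List.mem_map.mp h with ⟨p, hp, he⟩
      exact ⟨p, List.mem_cons_of_mem _ hp, he.symm⟩
  rcases hmem with ⟨p₀, hp₀, hMe⟩
  rcases hf p₀ hp₀ with ⟨e, hn⟩ | ⟨m, e, hm, hH, hmax⟩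
  · -- M = -1 : every result is ≤ -1, hence every result is -1
    have hM1 : M = -1 := by rw [hMe, e]
    refine Or.inl ⟨hM1, fun k hk ⟨p, hp, hHp⟩ => ?_⟩
    rcases hf p hp with ⟨e', hn'⟩ | ⟨m', e', hm', hH', hmax'⟩
    · exact hn' k hk hHp
    · have := hub p hp
      rw [hM1, e'] at this
      omega
  · refine Or.inr ⟨m, by rw [hMe, e], hm, ⟨p₀, hp₀, hH⟩, fun k h1 h2 ⟨p, hp, hHp⟩ => ?_⟩
    rcases hf p hp with ⟨e', hn'⟩ | ⟨m', e', hm', hH', hmax'⟩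
    · exact hn' k h2 hHp
    · -- the hit k would force f p ≥ k > m = M, contradicting f p ≤ M
      have hk_le : k ≤ m' := by
        by_contra hc
        exact hmax' k (by omega) h2 hHp
      have := hub p hp
      rw [hMe, e] at this
      rw [e'] at this
      omega

-- B's backward scan computes the last hit of its loop test
theorem fsbBefore_isLastHit (s : List Char) (st : Nat) :
    ∀ i, IsLastHit (fun k => fsbDelimB s st k = true) i (fsbBefore s st i) := by
  intro i
  induction i with
  | zero =>
    by_cases h : fsbDelimB s st 0
    · exact Or.inr ⟨0, by simp [fsbBefore, h], le_refl _, h, by omega⟩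
    · exact Or.inl ⟨by simp [fsbBefore, h], fun k hk => by interval_cases k; simpa using h⟩
  | succ i ih =>
    by_cases h : fsbDelimB s st (i+1)
    · exact Or.inr ⟨i+1, by simp [fsbBefore, h], le_refl _, h, by omega⟩
    · have hb : fsbBefore s st (i+1) = fsbBefore s st i := by simp [fsbBefore, h]
      rw [hb]
      rcases ih with ⟨e, hn⟩ | ⟨m, e, hm, hH, hmax⟩
      · exact Or.inl ⟨e, fun k hk hc => by
          rcases Nat.lt_or_ge k (i+1) with h' | h'
          · exact hn k (by omega) hc
          · have : k = i + 1 := by omega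
            exact h (this ▸ hc)⟩
      · exact Or.inr ⟨m, e, by omega, hH, fun k h1 h2 hc => by
          rcases Nat.lt_or_ge k (i+1) with h' | h'
          · exact hmax k h1 (by omega) hc
          · have : k = i + 1 := by omega
            exact h (this ▸ hc)⟩

-- B's forward scan computes the first hit of its loop test (or the length)
theorem fsbAfter_isFirstHit (s : List Char) :
    ∀ j, IsFirstHit (fun k => fsbDelimA s k = true) j s.length (fsbAfter s j) := by
  intro j
  induction hd : s.length - j using Nat.strong_induction_on generalizing j with
  | _ d ih =>
    rw [fsbAfter]
    by_cases hj : j < s.length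
    · rw [dif_pos hj]
      by_cases h : fsbDelimA s j
      · rw [if_pos h]
        exact Or.inr ⟨j, rfl, le_refl _, hj, h, by omega⟩
      · rw [if_neg h]
        have hrec := ih (s.length - (j+1)) (by omega) (j+1) rfl
        rcases hrec with ⟨e, hn⟩ | ⟨m, e, hjm, hlt, hH, hmin⟩
        · exact Or.inl ⟨e, fun k hk hc => by
            rcases Nat.lt_or_ge k (j+1) with h' | h'
            · have : k = j := by omega
              exact h (this ▸ hc)
            · exact hn k h' hc⟩
        · exact Or.inr ⟨m, e, by omega, hlt, hH, fun k h1 h2 hc => by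
            rcases Nat.lt_or_ge k (j+1) with h' | h'
            · have : k = j := by omega
              exact h (this ▸ hc)
            · exact hmin k h' h2 hc⟩
    · rw [dif_neg hj]
      exact Or.inl ⟨rfl, fun k hk hc => by
        have h0 : s[k]? = none := by
          apply List.getElem?_eq_none
          omega
        simp [fsbDelimA, h0] at hc⟩

-- the list of symbols as char lists
def fsbSubs : List (List Char) := [['!'], ['?'], ['。'], ['！'], ['？'], ['/', 'n'], [';'], ['；'], [' ']]

theorem fsbSubs_eq : fsbSymbols.map String.toList = fsbSubs := by decide

-- bridge: the backward loop test vs "some symbol occurs here within text[:st]"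
theorem delimB_iff (s : List Char) (st k : Nat) (hk : k < st) :
    fsbDelimB s st k = true ↔ ∃ p ∈ fsbSubs, p <+: (s.take st).drop k := by
  have hd0 : ((s.take st).drop k)[0]? = s[k]? := by
    simp [List.getElem?_drop, hk]
  have hd1 : ((s.take st).drop k)[1]? = if k + 1 < st then s[k+1]? else none := by
    simp [List.getElem?_drop, List.getElem?_take]
  simp only [fsbDelimB, fsbSubs, List.mem_cons, List.not_mem_nil, or_false,
    exists_eq_or_imp, exists_eq_left, single_prefix, pair_prefix, hd0, hd1, fsbSingles]
  by_cases h2 : k + 1 < st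
  · cases hk' : s[k]? with
    | none => simp [h2]
    | some c =>
      simp [List.contains_eq_mem, h2, show k + 2 ≤ st by omega]
      tauto
  · cases hk' : s[k]? with
    | none => simp [h2]
    | some c =>
      simp [List.contains_eq_mem, h2, show ¬ (k + 2 ≤ st) by omega]


-- bridge: the forward loop test vs "some symbol occurs here"
theorem delimA_iff (s : List Char) (k : Nat) :
    fsbDelimA s k = true ↔ ∃ p ∈ fsbSubs, p <+: s.drop k := by
  have hd0 : (s.drop k)[0]? = s[k]? := by simp [List.getElem?_drop]
  have hd1 : (s.drop k)[1]? = s[k+1]? := by simp [List.getElem?_drop]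
  simp only [fsbDelimA, fsbSubs, List.mem_cons, List.not_mem_nil, or_false,
    exists_eq_or_imp, exists_eq_left, single_prefix, pair_prefix, hd0, hd1, fsbSingles]
  cases hk : s[k]? with
  | none => simp
  | some c => simp [List.contains_eq_mem]; tauto


-- per-symbol first-occurrence facts for find(p, k), then Python's min over the found ones
theorem findFrom_firstHit (s p : List Char) (k : Nat) (hk : k ≤ s.length) (hp : p ≠ []) :
    (PySem.Chars.findFrom s p (k:Int) none = -1 ∧ ∀ i, k ≤ i → ¬ p <+: s.drop i) ∨
    (∃ m : Nat, PySem.Chars.findFrom s p (k:Int) none = (m:Int) ∧ k ≤ m ∧ m < s.length ∧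
      p <+: s.drop m ∧ ∀ i, k ≤ i → i < m → ¬ p <+: s.drop i) := by
  by_cases h : PySem.Chars.findFrom s p (k:Int) none = -1
  · left
    refine ⟨h, fun i hi hpre => ?_⟩
    have hnin := (PySem.Chars.findFrom_natCast_eq_neg_one_iff s p k hk).mp h
    apply hnin
    have hdd : s.drop i = (s.drop k).drop (i - k) := by
      rw [List.drop_drop]
      congr 1
      omega
    exact hpre.isInfix.trans (hdd ▸ (List.drop_suffix (i-k) (s.drop k)).isInfix)
  · right
    obtain ⟨hle, hpre, hmin⟩ := PySem.Chars.findFrom_natCast_spec s p k hk h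
    set res := PySem.Chars.findFrom s p (k:Int) none with hres
    have h0 : (0:Int) ≤ res := le_trans (by exact_mod_cast Nat.zero_le k) hle
    refine ⟨res.toNat, by omega, by omega, ?_, hpre, hmin⟩
    have hne : s.drop res.toNat ≠ [] := fun hc => hp (List.prefix_nil.mp (hc ▸ hpre))
    have := List.length_drop (l := s) (i := res.toNat)
    have hlen : s.drop res.toNat ≠ [] → s.length - res.toNat ≠ 0 := by
      intro _ hc
      apply hne
      apply List.eq_nil_of_length_eq_zero
      omega
    have := hlen hne
    omega


theorem foldl_min_isFirstHit {α : Type} (k n : Nat) (f : α → Int) (H : α → Nat → Prop)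
    (S : List α)
    (hf : ∀ p ∈ S, (f p = -1 ∧ ∀ i, k ≤ i → ¬ H p i) ∨
      (∃ m : Nat, f p = (m:Int) ∧ k ≤ m ∧ m < n ∧ H p m ∧ ∀ i, k ≤ i → i < m → ¬ H p i)) :
    IsFirstHit (fun i => ∃ p ∈ S, H p i) k n
      (match S.filterMap (fun p => if f p ≠ -1 then some (f p) else none) with
        | [] => (n : Int)
        | x :: r => r.foldl min x) := by
  set g : α → Option Int := fun p => if f p ≠ -1 then some (f p) else none with hg
  cases hc : S.filterMap g with
  | nil =>
    refine Or.inl ⟨rfl, fun i hi ⟨p, hp, hHp⟩ => ?_⟩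
    rcases hf p hp with ⟨e, hn⟩ | ⟨m, e, h1, h2, hH, hmin⟩
    · exact hn i hi hHp
    · have hnem : f p ∈ S.filterMap g := by
        apply List.mem_filterMap.mpr
        exact ⟨p, hp, by simp [hg, e]⟩
      rw [hc] at hnem
      exact absurd hnem (List.not_mem_nil)
  | cons x r =>
    have hlb : ∀ y ∈ x :: r, r.foldl min x ≤ y := by
      intro y hy
      rcases List.mem_cons.mp hy with rfl | hy'
      · exact (PySem.List.foldl_min_le r y).1
      · exact (PySem.List.foldl_min_le r x).2 y hy'
    have hmem : r.foldl min x ∈ x :: r := by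
      rcases PySem.List.foldl_min_mem r x with h | h
      · rw [h]; exact List.mem_cons_self
      · exact List.mem_cons_of_mem _ h
    rw [← hc] at hmem
    rcases List.mem_filterMap.mp hmem with ⟨p₀, hp₀, hgp₀⟩
    have hfp₀ : f p₀ = r.foldl min x ∧ f p₀ ≠ -1 := by
      by_cases hne : f p₀ ≠ -1 <;> simp [hg, hne] at hgp₀
      · exact ⟨hgp₀, hne⟩
    rcases hf p₀ hp₀ with ⟨e, _⟩ | ⟨m₀, e, h1, h2, hH, hmin⟩
    · exact absurd e hfp₀.2
    · refine Or.inr ⟨m₀, by show r.foldl min x = (m₀:Int); rw [← hfp₀.1, e], h1, h2, ⟨p₀, hp₀, hH⟩, ?_⟩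
      rintro i hi him ⟨p, hp, hHp⟩
      rcases hf p hp with ⟨e', hn'⟩ | ⟨m', e', h1', h2', hH', hmin'⟩
      · exact hn' i hi hHp
      · by_cases hlt : i < m'
        · exact hmin' i hi hlt hHp
        · -- m' ≤ i < m₀, but f p ∈ cands so foldl min ≤ f p, i.e. m₀ ≤ m'
          have hfmem : f p ∈ S.filterMap g := by
            apply List.mem_filterMap.mpr
            refine ⟨p, hp, by simp [hg, e']⟩
          rw [hc] at hfmem
          have := hlb _ hfmem
          rw [← hfp₀.1, e, e'] at this
          have : m₀ ≤ m' := by exact_mod_cast this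
          omega


-- ===== VERDICT (by name: the statement is the Claim_ definition above) =====
theorem find_sentence_boundaries_spec : Claim_equal_find_sentence_boundaries := by
  intro text trunc _
  unfold Spec_find_sentence_boundaries find_sentence_boundaries find_sentence_boundaries_alt
  by_cases hF : PySem.Chars.find text.toList trunc.toList = -1
  · simp [hF]
  · simp only [PySem.Str.find_eq, hF, if_false]
    -- notation
    have hge : (0:Int) ≤ PySem.Chars.find text.toList trunc.toList := by
      have := PySem.Chars.neg_one_le_find text.toList trunc.toList
      omega
    set s := text.toList with hs
    set t := trunc.toList with ht
    set st := (PySem.Chars.find s t).toNat with hstdef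
    have hcast : PySem.Chars.find s t = (st : Int) := by omega
    have hstle : st ≤ s.length := by
      have := PySem.Chars.find_le_length s t
      omega
    have hpre : t <+: s.drop st := (PySem.Chars.find_spec hge).1
    have hk2le : st + t.length ≤ s.length := by
      have := hpre.length_le
      have := List.length_drop (l := s) (i := st)
      omega
    have hsubsne : ∀ q ∈ fsbSubs, q ≠ [] := by decide
    -- ---- BEFORE boundary ----
    have hmapr : List.map (fun p => PySem.Str.rfindFrom text p 0 (some (PySem.Chars.find s t))) fsbSymbols
        = fsbSubs.map (fun q => PySem.Chars.rfind (s.take st) q) := by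
      rw [← fsbSubs_eq, List.map_map]
      apply List.map_congr_left
      intro p _
      simp only [Function.comp, PySem.Str.rfindFrom_eq, ← hs, hcast]
      exact rfindFrom_eq_rfind_take s p.toList st hstle
    have hfq : ∀ q ∈ fsbSubs, IsLastHit (fun k => q <+: (s.take st).drop k) st
        (PySem.Chars.rfind (s.take st) q) := by
      intro q _
      have h := rfind_isLastHit (s.take st) q
      rwa [List.length_take, min_eq_left hstle] at h
    have hbA : IsLastHit (fun k => ∃ q ∈ fsbSubs, q <+: (s.take st).drop k) st
        (match fsbSubs.map (fun q => PySem.Chars.rfind (s.take st) q) with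
          | [] => (-1 : Int)
          | x :: r => r.foldl max x) :=
      foldl_max_isLastHit st (fun q => PySem.Chars.rfind (s.take st) q)
        (fun q k => q <+: (s.take st).drop k) ['!']
        [['?'], ['。'], ['！'], ['？'], ['/', 'n'], [';'], ['；'], [' ']] hfq
    have hdropnil : (s.take st).drop st = [] := by
      apply List.drop_eq_nil_of_le
      rw [List.length_take]
      omega
    have hnotop : ¬ (∃ q ∈ fsbSubs, q <+: (s.take st).drop st) := by
      rintro ⟨q, hq, hp⟩
      rw [hdropnil] at hp
      exact hsubsne q hq (List.prefix_nil.mp hp)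
    have hbefore : (match fsbSubs.map (fun q => PySem.Chars.rfind (s.take st) q) with
          | [] => (-1 : Int)
          | x :: r => r.foldl max x) = (if st = 0 then -1 else fsbBefore s st (st - 1)) := by
      by_cases h0 : st = 0
      · rw [if_pos h0]
        rcases hbA with ⟨e, _⟩ | ⟨m, e, hm, hH, _⟩
        · exact e
        · have hm0 : m = st := by omega
          exact absurd (hm0 ▸ hH) hnotop
      · rw [if_neg h0]
        have hsucc : st - 1 + 1 = st := by omega
        have hA' := isLastHit_of_not_top (fun k => ∃ q ∈ fsbSubs, q <+: (s.take st).drop k)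
          (st - 1) _ (by rw [hsucc]; exact hnotop) (by rw [hsucc]; exact hbA)
        have hA'' := isLastHit_congr _ (fun k => fsbDelimB s st k = true) (st - 1) _
          (fun k hk => (delimB_iff s st k (by omega)).symm) hA'
        have hB := fsbBefore_isLastHit s st (st - 1)
        exact isLastHit_unique _ (st - 1) _ _ hA'' hB
    -- ---- AFTER boundary ----
    have hcands : List.filterMap (fun x =>
          if PySem.Str.findFrom text x (PySem.Chars.find s t + PySem.Str.len trunc) ≠ -1 then
            some (PySem.Str.findFrom text x (PySem.Chars.find s t + PySem.Str.len trunc))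
          else none) fsbSymbols
        = fsbSubs.filterMap (fun q =>
            if PySem.Chars.findFrom s q ((st + t.length : Nat) : Int) none ≠ -1 then
              some (PySem.Chars.findFrom s q ((st + t.length : Nat) : Int) none)
            else none) := by
      rw [← fsbSubs_eq, List.filterMap_map]
      apply List.filterMap_congr
      intro p _
      simp only [Function.comp, PySem.Str.findFrom_eq, PySem.Str.len_eq, ← hs, ← ht, hcast]
      norm_cast
    have hfq' : ∀ q ∈ fsbSubs,
        (PySem.Chars.findFrom s q ((st + t.length : Nat) : Int) none = -1 ∧
          ∀ i, st + t.length ≤ i → ¬ q <+: s.drop i) ∨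
        (∃ m : Nat, PySem.Chars.findFrom s q ((st + t.length : Nat) : Int) none = (m:Int) ∧
          st + t.length ≤ m ∧ m < s.length ∧ q <+: s.drop m ∧
          ∀ i, st + t.length ≤ i → i < m → ¬ q <+: s.drop i) :=
      fun q hq => findFrom_firstHit s q (st + t.length) hk2le (hsubsne q hq)
    have haA := foldl_min_isFirstHit (st + t.length) s.length
      (fun q => PySem.Chars.findFrom s q ((st + t.length : Nat) : Int) none)
      (fun q i => q <+: s.drop i) fsbSubs hfq'
    have hB' := fsbAfter_isFirstHit s (st + t.length)
    have hB'' := isFirstHit_congr _ (fun i => ∃ q ∈ fsbSubs, q <+: s.drop i)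
      (st + t.length) s.length _ (fun k _ => delimA_iff s k) hB'
    have hafter : (match fsbSubs.filterMap (fun q =>
            if PySem.Chars.findFrom s q ((st + t.length : Nat) : Int) none ≠ -1 then
              some (PySem.Chars.findFrom s q ((st + t.length : Nat) : Int) none)
            else none) with
          | [] => (s.length : Int)
          | x :: r => r.foldl min x) = fsbAfter s (st + t.length) :=
      isFirstHit_unique _ (st + t.length) s.length _ _ haA hB''
    have hafter_ne : fsbAfter s (st + t.length) ≠ -1 := by
      rcases hB' with ⟨e, _⟩ | ⟨m, e, _, _, _, _⟩ <;> rw [e] <;> omega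
    rw [hmapr, hcands, hbefore]
    have hlen : PySem.Str.len text = (s.length : Int) := PySem.Str.len_eq text
    rw [hlen, hafter, if_neg hafter_ne]
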